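-- pv_equiv track=rewrite | github.com/zeesh-ali/Text_Mining | HW2.py | hedge
-- ===== SOURCE A (Python) =====
-- def hedge(text):
--     counter=0
--     list1=[]
--     for w in text:
--         counter+=1
--         if counter%3==0:
--             list1.append("like")
--             list1.append(w)
--         else:
--             list1.append(w)
--     return (list1)
-- ===== SOURCE B (Python) =====
-- def hedge(text):
--     ws = list(text)
--     n = len(ws)
--     out = []
--     i = 0
--     while i + 3 <= n:
--         out += [ws[i], ws[i + 1], "like", ws[i + 2]]
--         i += 3
--     out += ws[i:]
--     return out
-- ===== Notes on version B (the rewrite author's own statement) =====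
-- stated objective: alternative
-- what changed: Replaces the per-word running counter with a modulus test by an index loop that steps over whole triples, emitting the two leading words, 'like', and the triple's last word at once, then the partial tail.
import Mathlib
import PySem

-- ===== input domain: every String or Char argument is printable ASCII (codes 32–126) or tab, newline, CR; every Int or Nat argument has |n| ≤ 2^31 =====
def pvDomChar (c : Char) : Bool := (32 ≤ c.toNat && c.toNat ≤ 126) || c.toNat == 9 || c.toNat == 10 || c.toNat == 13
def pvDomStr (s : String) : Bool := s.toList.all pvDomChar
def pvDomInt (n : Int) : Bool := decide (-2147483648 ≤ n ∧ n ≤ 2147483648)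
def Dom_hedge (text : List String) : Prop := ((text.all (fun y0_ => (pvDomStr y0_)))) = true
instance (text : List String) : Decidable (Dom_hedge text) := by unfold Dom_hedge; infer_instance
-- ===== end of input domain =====

-- B replaces A's per-word running counter by an index loop over whole triples (objective: alternative decomposition, same cost).

-- ===== PORT A =====
-- A: counter incremented per word; when counter % 3 == 0 append "like" before the word.
def hedgeLoop (ws : List String) (counter : Int) (list1 : List String) : List String :=
  match ws with
  | [] => list1
  | w :: rest =>
      let c := counter + 1
      if PySem.Int.mod c 3 == 0 then
        hedgeLoop rest c (list1 ++ ["like", w])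
      else
        hedgeLoop rest c (list1 ++ [w])

def hedge (text : List String) : List String := hedgeLoop text 0 []

-- ===== PORT B =====
-- B: while i + 3 <= n, emit ws[i], ws[i+1], "like", ws[i+2] and step i by 3; then the tail ws[i:].
-- Indexing ws[i] (i in range, nonnegative loop index) is ported as List.getD i "".
def hedgeAltLoop (ws : List String) (n : Nat) (out : List String) (i : Nat) : List String :=
  if i + 3 ≤ n then
    hedgeAltLoop ws n (out ++ [ws.getD i "", ws.getD (i + 1) "", "like", ws.getD (i + 2) ""]) (i + 3)
  else
    out ++ ws.drop i
termination_by n - i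

def hedge_alt (text : List String) : List String :=
  hedgeAltLoop text text.length [] 0

-- ===== PRECONDITION & SPEC =====
def Spec_hedge (text : List String) (out : List String) : Prop := out = hedge_alt text
instance (text : List String) (out : List String) : Decidable (Spec_hedge text out) := by unfold Spec_hedge; infer_instance

-- ===== CLAIM =====
def Claim_equal_hedge : Prop := ∀ (text : List String), Dom_hedge text → Spec_hedge text (hedge text)

-- ===== LEMMAS AND PROOFS =====
-- reference form: consume triples structurally; both loops are proved equal to it
def tripleRec (ws : List String) : List String :=
  match ws with
  | a :: b :: c :: rest => a :: b :: "like" :: c :: tripleRec rest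
  | ws => ws

theorem pv_mod1 (k : Int) : (PySem.Int.mod (3 * k + 1) 3 == 0) = false := by
  rw [PySem.Int.mod_eq_emod_of_pos (by omega)]
  simp only [beq_eq_false_iff_ne, ne_eq]; omega
theorem pv_mod2 (k : Int) : (PySem.Int.mod (3 * k + 1 + 1) 3 == 0) = false := by
  rw [PySem.Int.mod_eq_emod_of_pos (by omega)]
  simp only [beq_eq_false_iff_ne, ne_eq]; omega
theorem pv_mod3 (k : Int) : (PySem.Int.mod (3 * k + 1 + 1 + 1) 3 == 0) = true := by
  rw [PySem.Int.mod_eq_emod_of_pos (by omega)]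
  simp only [beq_iff_eq]; omega

theorem hedgeLoop_inv (ws : List String) (k : Int) (acc : List String) :
    hedgeLoop ws (3 * k) acc = acc ++ tripleRec ws := by
  induction ws using tripleRec.induct generalizing k acc with
  | case1 a b c rest ih =>
      simp only [hedgeLoop, pv_mod1, pv_mod2, pv_mod3, if_true, if_false, Bool.false_eq_true]
      rw [show (3 : Int) * k + 1 + 1 + 1 = 3 * (k + 1) by ring, ih (k + 1)]
      simp [tripleRec]
  | case2 ws hne =>
      match ws, hne with
      | [], _ => simp [hedgeLoop, tripleRec]
      | [a], _ =>
          simp only [hedgeLoop, pv_mod1, Bool.false_eq_true, if_false]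
          simp [tripleRec]
      | [a, b], _ =>
          simp only [hedgeLoop, pv_mod1, pv_mod2, Bool.false_eq_true, if_false]
          simp [tripleRec]
      | a :: b :: c :: rest, hne => exact (hne a b c rest rfl).elim

theorem tripleRec_short (ws : List String) (h : ws.length < 3) : tripleRec ws = ws := by
  match ws, h with
  | [], _ => rfl
  | [a], _ => rfl
  | [a, b], _ => rfl

theorem drop_triple (ws : List String) (i : Nat) (h : i + 3 ≤ ws.length) :
    ws.drop i = ws.getD i "" :: ws.getD (i + 1) "" :: ws.getD (i + 2) "" :: ws.drop (i + 3) := by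
  rw [List.drop_eq_getElem_cons (by omega), List.drop_eq_getElem_cons (by omega),
      List.drop_eq_getElem_cons (by omega)]
  simp [List.getElem?_eq_getElem (by omega : i < ws.length),
        List.getElem?_eq_getElem (by omega : i + 1 < ws.length),
        List.getElem?_eq_getElem (by omega : i + 2 < ws.length)]

theorem hedgeAltLoop_inv (ws : List String) (acc : List String) (i : Nat) :
    hedgeAltLoop ws ws.length acc i = acc ++ tripleRec (ws.drop i) := by
  by_cases h : i + 3 ≤ ws.length
  · rw [hedgeAltLoop, if_pos h, hedgeAltLoop_inv ws _ (i + 3),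
        drop_triple ws i h]
    simp [tripleRec]
  · rw [hedgeAltLoop, if_neg h, tripleRec_short _ (by simp; omega)]
termination_by ws.length - i

-- ===== VERDICT =====
theorem hedge_spec : Claim_equal_hedge := by
  intro text _
  show hedge text = hedge_alt text
  have hA := hedgeLoop_inv text 0 []
  have hB := hedgeAltLoop_inv text [] 0
  simp only [hedge, hedge_alt, mul_zero] at *
  rw [hA, hB]
  simp
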